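-- pv_equiv track=rewrite | github.com/AlphaBravo227/CrewOps360 | modules/enhanced_validation_display.py | get_weekend_days_for_highlighting_inline
-- ===== SOURCE A (Python) =====
-- def get_weekend_days_for_highlighting_inline(weekend_group, days):
--     """
--     Get weekend days that should be highlighted for a specific weekend group
--     """
--     if not weekend_group:
--         return []
--
--     # Weekend group definitions
--     WEEKEND_GROUPS = {
--         'A': {
--             'periods': [
--                 ['Fri C 6', 'Sat C 6', 'Sun A 1'],  # Period 1
--                 ['Fri A 2', 'Sat A 2', 'Sun B 3'],  # Period 2
--                 ['Fri B 4', 'Sat B 4', 'Sun C 5']   # Period 3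
--             ]
--         },
--         'B': {
--             'periods': [
--                 ['Fri A 1', 'Sat A 1', 'Sun A 2'],  # Period 1
--                 ['Fri B 3', 'Sat B 3', 'Sun B 4'],  # Period 2
--                 ['Fri C 5', 'Sat C 5', 'Sun C 6']   # Period 3
--             ]
--         },
--         'C': {
--             'periods': [
--                 ['Fri C 6', 'Sat C 6', 'Sun A 1'],  # Period 1
--                 ['Fri B 3', 'Sat B 3', 'Sun B 4']   # Period 2
--             ]
--         },
--         'D': {
--             'periods': [
--                 ['Fri A 1', 'Sat A 1', 'Sun A 2'],  # Period 1
--                 ['Fri B 4', 'Sat B 4', 'Sun C 5']   # Period 2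
--             ]
--         },
--         'E': {
--             'periods': [
--                 ['Fri A 2', 'Sat A 2', 'Sun B 3'],  # Period 1
--                 ['Fri C 5', 'Sat C 5', 'Sun C 6']   # Period 2
--             ]
--         }
--     }
--
--     if weekend_group not in WEEKEND_GROUPS:
--         return []
--
--     # Get all weekend days for the group
--     all_weekend_days = []
--     for period in WEEKEND_GROUPS[weekend_group]['periods']:
--         all_weekend_days.extend(period)
--
--     # Map to actual schedule days
--     highlight_days = []
--     for weekend_day in all_weekend_days:
--         schedule_day = map_weekend_day_to_schedule_day_inline(weekend_day, days)
--         if schedule_day: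
--             highlight_days.append(schedule_day)
--
--     return highlight_days
--
-- def map_weekend_day_to_schedule_day_inline(weekend_day, days):
--     """
--     Map a weekend group day (e.g., 'Fri A 1') to actual schedule day
--     """
--     # Parse the weekend day format
--     parts = weekend_day.split()
--     if len(parts) != 3:
--         return None
--
--     day_name, block, week = parts
--
--     # Find matching day in schedule
--     for schedule_day in days:
--         schedule_parts = schedule_day.split()
--         if len(schedule_parts) >= 1:
--             schedule_day_name = schedule_parts[0]
--
--             # Check if day names match (Fri, Sat, Sun)
--             if schedule_day_name == day_name:
--                 # Check if it contains the block and week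
--                 if block in schedule_day and week in schedule_day:
--                     return schedule_day
--
--     return None
-- ===== SOURCE B (Python) =====
-- WEEKEND_TOKENS = {
--     'A': ['Fri C 6', 'Sat C 6', 'Sun A 1',
--           'Fri A 2', 'Sat A 2', 'Sun B 3',
--           'Fri B 4', 'Sat B 4', 'Sun C 5'],
--     'B': ['Fri A 1', 'Sat A 1', 'Sun A 2',
--           'Fri B 3', 'Sat B 3', 'Sun B 4',
--           'Fri C 5', 'Sat C 5', 'Sun C 6'],
--     'C': ['Fri C 6', 'Sat C 6', 'Sun A 1',
--           'Fri B 3', 'Sat B 3', 'Sun B 4'],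
--     'D': ['Fri A 1', 'Sat A 1', 'Sun A 2',
--           'Fri B 4', 'Sat B 4', 'Sun C 5'],
--     'E': ['Fri A 2', 'Sat A 2', 'Sun B 3',
--           'Fri C 5', 'Sat C 5', 'Sun C 6'],
-- }
--
--
-- def _first_match(bucket, block, week):
--     for d in bucket:
--         if block in d and week in d:
--             return d
--     return None
--
--
-- def get_weekend_days_for_highlighting_inline(weekend_group, days):
--     tokens = WEEKEND_TOKENS.get(weekend_group)
--     if tokens is None:
--         return []
--     # Index the schedule once: group days by their first whitespace token,
--     # preserving original order within each bucket.
--     buckets = {}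
--     for d in days:
--         parts = d.split()
--         if parts:
--             buckets[parts[0]] = buckets.get(parts[0], []) + [d]
--     out = []
--     for tok in tokens:
--         parts = tok.split()
--         if len(parts) != 3:
--             continue
--         day_name, block, week = parts
--         match = _first_match(buckets.get(day_name, []), block, week)
--         if match is not None:
--             out.append(match)
--     return out
-- ===== Notes on version B (the rewrite author's own statement) =====
-- stated objective: alternative
-- what changed: B builds a one-pass index grouping schedule days by their first whitespace token and answers each of the group's fixed day tokens by a first-match scan of only the matching bucket, instead of A's per-token rescan of the whole days list with per-element re-splitting.
import Mathlib
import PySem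

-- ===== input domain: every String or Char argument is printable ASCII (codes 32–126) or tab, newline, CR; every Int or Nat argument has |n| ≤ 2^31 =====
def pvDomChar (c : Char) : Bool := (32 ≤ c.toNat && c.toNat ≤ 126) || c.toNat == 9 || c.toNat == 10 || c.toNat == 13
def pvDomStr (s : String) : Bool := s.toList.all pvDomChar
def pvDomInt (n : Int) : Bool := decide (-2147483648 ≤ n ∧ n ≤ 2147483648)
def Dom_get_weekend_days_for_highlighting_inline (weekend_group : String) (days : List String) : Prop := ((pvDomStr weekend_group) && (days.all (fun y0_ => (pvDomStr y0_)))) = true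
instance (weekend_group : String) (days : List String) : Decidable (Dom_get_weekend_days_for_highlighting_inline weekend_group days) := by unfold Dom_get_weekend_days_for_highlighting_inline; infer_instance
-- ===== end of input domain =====

-- B replaces A's per-token full rescan of `days` by a single grouping pass (an index keyed by the
-- first whitespace token) followed by first-match scans of the relevant bucket only (objective: alternative).

-- ===== PORT A =====
-- WEEKEND_GROUPS literal of A
def pvGroupsA : PySem.Dict String (List (List String)) :=
  PySem.Dict.mk
    [ ("A", [["Fri C 6", "Sat C 6", "Sun A 1"],
             ["Fri A 2", "Sat A 2", "Sun B 3"],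
             ["Fri B 4", "Sat B 4", "Sun C 5"]]),
      ("B", [["Fri A 1", "Sat A 1", "Sun A 2"],
             ["Fri B 3", "Sat B 3", "Sun B 4"],
             ["Fri C 5", "Sat C 5", "Sun C 6"]]),
      ("C", [["Fri C 6", "Sat C 6", "Sun A 1"],
             ["Fri B 3", "Sat B 3", "Sun B 4"]]),
      ("D", [["Fri A 1", "Sat A 1", "Sun A 2"],
             ["Fri B 4", "Sat B 4", "Sun C 5"]]),
      ("E", [["Fri A 2", "Sat A 2", "Sun B 3"],
             ["Fri C 5", "Sat C 5", "Sun C 6"]]) ]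

-- the `for schedule_day in days` loop of map_weekend_day_to_schedule_day_inline
def pvMapLoopA (day_name block week : String) : List String → Option String
  | [] => none
  | d :: rest =>
      match PySem.Str.split₀ d with
      | [] => pvMapLoopA day_name block week rest        -- len(schedule_parts) >= 1 is false
      | schedule_day_name :: _ =>
          if schedule_day_name == day_name then
            if PySem.Str.isIn block d && PySem.Str.isIn week d then some d
            else pvMapLoopA day_name block week rest
          else pvMapLoopA day_name block week rest

-- map_weekend_day_to_schedule_day_inline
def pvMapWeekendDayA (weekend_day : String) (days : List String) : Option String :=
  match PySem.Str.split₀ weekend_day with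
  | [day_name, block, week] => pvMapLoopA day_name block week days   -- len(parts) == 3
  | _ => none

def get_weekend_days_for_highlighting_inline (weekend_group : String) (days : List String) : List String :=
  if weekend_group = "" then []          -- `if not weekend_group`
  else
    match pvGroupsA.get? weekend_group with
    | none => []                         -- `weekend_group not in WEEKEND_GROUPS`
    | some periods =>
        let all_weekend_days := periods.foldl (fun acc period => acc ++ period) []
        all_weekend_days.foldl (fun acc weekend_day =>
          match pvMapWeekendDayA weekend_day days with
          | some schedule_day => acc ++ [schedule_day]
          | none => acc) []

-- ===== PORT B =====
-- WEEKEND_TOKENS literal of B (periods already flattened)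
def pvTokensB : PySem.Dict String (List String) :=
  PySem.Dict.mk
    [ ("A", ["Fri C 6", "Sat C 6", "Sun A 1",
             "Fri A 2", "Sat A 2", "Sun B 3",
             "Fri B 4", "Sat B 4", "Sun C 5"]),
      ("B", ["Fri A 1", "Sat A 1", "Sun A 2",
             "Fri B 3", "Sat B 3", "Sun B 4",
             "Fri C 5", "Sat C 5", "Sun C 6"]),
      ("C", ["Fri C 6", "Sat C 6", "Sun A 1",
             "Fri B 3", "Sat B 3", "Sun B 4"]),
      ("D", ["Fri A 1", "Sat A 1", "Sun A 2",
             "Fri B 4", "Sat B 4", "Sun C 5"]),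
      ("E", ["Fri A 2", "Sat A 2", "Sun B 3",
             "Fri C 5", "Sat C 5", "Sun C 6"]) ]

-- the indexing pass: group days by their first whitespace token
def pvBucketsB (days : List String) : PySem.Dict String (List String) :=
  days.foldl (fun b d =>
    match PySem.Str.split₀ d with
    | [] => b
    | key :: _ => b.insert key (b.getD key [] ++ [d])) PySem.Dict.empty

-- _first_match
def pvFirstMatchB (bucket : List String) (block week : String) : Option String :=
  bucket.find? (fun d => PySem.Str.isIn block d && PySem.Str.isIn week d)

def get_weekend_days_for_highlighting_inline_alt (weekend_group : String) (days : List String) : List String :=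
  match pvTokensB.get? weekend_group with
  | none => []
  | some tokens =>
      let buckets := pvBucketsB days
      tokens.foldl (fun out tok =>
        match PySem.Str.split₀ tok with
        | [day_name, block, week] =>
            match pvFirstMatchB (buckets.getD day_name []) block week with
            | some m => out ++ [m]
            | none => out
        | _ => out) []

-- ===== PRECONDITION & SPEC =====
def Spec_get_weekend_days_for_highlighting_inline (weekend_group : String) (days : List String) (out : List String) : Prop := out = get_weekend_days_for_highlighting_inline_alt weekend_group days
instance (weekend_group : String) (days : List String) (out : List String) : Decidable (Spec_get_weekend_days_for_highlighting_inline weekend_group days out) := by unfold Spec_get_weekend_days_for_highlighting_inline; infer_instance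

-- ===== CLAIM (what is proved, stated in full; the proofs are below) =====
def Claim_equal_get_weekend_days_for_highlighting_inline : Prop := ∀ (weekend_group : String) (days : List String), Dom_get_weekend_days_for_highlighting_inline weekend_group days → Spec_get_weekend_days_for_highlighting_inline weekend_group days (get_weekend_days_for_highlighting_inline weekend_group days)

-- ===== LEMMAS AND PROOFS =====

-- membership predicate of the bucket keyed by `name`
def pvHeadIs (name d : String) : Bool :=
  match PySem.Str.split₀ d with
  | [] => false
  | h :: _ => h == name

lemma pvStep_getD (b : PySem.Dict String (List String)) (d name : String) :
    (match PySem.Str.split₀ d with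
     | [] => b
     | key :: _ => b.insert key (b.getD key [] ++ [d])).getD name []
      = b.getD name [] ++ (if pvHeadIs name d then [d] else []) := by
  cases hsp : PySem.Str.split₀ d with
  | nil => simp [pvHeadIs, hsp]
  | cons key t =>
      simp only [pvHeadIs, hsp, PySem.Dict.getD_insert]
      by_cases hk : name = key
      · subst hk; simp
      · have hb : (key == name) = false := by
          simp only [beq_eq_false_iff_ne]; exact fun e => hk e.symm
        simp [hk, hb]

-- the index's bucket for `name` is exactly the in-order sublist of days whose first token is `name`
lemma pvBuckets_getD (days : List String) (name : String) :
    (pvBucketsB days).getD name [] = days.filter (pvHeadIs name) := by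
  have general : ∀ (ds : List String) (b : PySem.Dict String (List String)),
      (ds.foldl (fun b d =>
        match PySem.Str.split₀ d with
        | [] => b
        | key :: _ => b.insert key (b.getD key [] ++ [d])) b).getD name []
        = b.getD name [] ++ ds.filter (pvHeadIs name) := by
    intro ds
    induction ds with
    | nil => simp
    | cons d rest ih =>
        intro b
        simp only [List.foldl_cons, List.filter_cons, ih, pvStep_getD]
        by_cases h : pvHeadIs name d <;> simp [h]
  simpa using general days PySem.Dict.empty

-- A's scan of the full days list equals a first-match search of the bucket's contents
lemma pvMapLoopA_eq_find (day_name block week : String) (days : List String) :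
    pvMapLoopA day_name block week days
      = (days.filter (pvHeadIs day_name)).find?
          (fun d => PySem.Str.isIn block d && PySem.Str.isIn week d) := by
  induction days with
  | nil => rfl
  | cons d rest ih =>
      rw [pvMapLoopA, List.filter_cons]
      cases hsp : PySem.Str.split₀ d with
      | nil => simp [pvHeadIs, hsp, ih]
      | cons h t =>
          by_cases hd : h == day_name
          · have hh : pvHeadIs day_name d = true := by simp [pvHeadIs, hsp, hd]
            simp only [hd, if_true, hh, List.find?_cons, ih]
            cases hin : (PySem.Str.isIn block d && PySem.Str.isIn week d) <;> simp_all
          · have hh : pvHeadIs day_name d = false := by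
              simp only [pvHeadIs, hsp]; simpa using hd
            simp [hd, hh, ih]

-- per-token agreement of A's helper with B's bucket lookup
lemma pvToken_eq (tok : String) (days : List String) :
    pvMapWeekendDayA tok days
      = (match PySem.Str.split₀ tok with
         | [day_name, block, week] =>
             pvFirstMatchB ((pvBucketsB days).getD day_name []) block week
         | _ => none) := by
  rw [pvMapWeekendDayA]
  cases hsp : PySem.Str.split₀ tok with
  | nil => rfl
  | cons a l1 =>
    cases l1 with
    | nil => rfl
    | cons bl l2 =>
      cases l2 with
      | nil => rfl
      | cons wk l3 =>
        cases l3 with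
        | nil => simp [pvMapLoopA_eq_find, pvFirstMatchB, pvBuckets_getD]
        | cons _ _ => rfl

-- both top-level loops agree token by token
lemma pvLoop_eq (toks : List String) (days : List String) (acc : List String) :
    toks.foldl (fun acc weekend_day =>
      match pvMapWeekendDayA weekend_day days with
      | some schedule_day => acc ++ [schedule_day]
      | none => acc) acc
      = toks.foldl (fun out tok =>
          match PySem.Str.split₀ tok with
          | [day_name, block, week] =>
              match pvFirstMatchB ((pvBucketsB days).getD day_name []) block week with
              | some m => out ++ [m]
              | none => out
          | _ => out) acc := by
  induction toks generalizing acc with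
  | nil => rfl
  | cons tok rest ih =>
      rw [List.foldl_cons, List.foldl_cons]
      have hacc : (match pvMapWeekendDayA tok days with
          | some schedule_day => acc ++ [schedule_day]
          | none => acc)
          = (match PySem.Str.split₀ tok with
             | [day_name, block, week] =>
                 match pvFirstMatchB ((pvBucketsB days).getD day_name []) block week with
                 | some m => acc ++ [m]
                 | none => acc
             | _ => acc) := by
        rw [pvToken_eq]
        rcases PySem.Str.split₀ tok with _ | ⟨a, _ | ⟨b, _ | ⟨c, _ | _⟩⟩⟩ <;> rfl
      rw [hacc]; exact ih _

-- ===== VERDICT (by name: the statement is the Claim_ definition above) =====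
theorem get_weekend_days_for_highlighting_inline_spec : Claim_equal_get_weekend_days_for_highlighting_inline := by
  intro wg days _
  show get_weekend_days_for_highlighting_inline wg days = get_weekend_days_for_highlighting_inline_alt wg days
  by_cases h0 : wg = ""
  · subst h0; rfl
  by_cases hA : wg = "A"
  · subst hA; rw [get_weekend_days_for_highlighting_inline]; simp only [if_neg h0]
    exact pvLoop_eq _ days []
  by_cases hB : wg = "B"
  · subst hB; rw [get_weekend_days_for_highlighting_inline]; simp only [if_neg h0]
    exact pvLoop_eq _ days []
  by_cases hC : wg = "C"
  · subst hC; rw [get_weekend_days_for_highlighting_inline]; simp only [if_neg h0]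
    exact pvLoop_eq _ days []
  by_cases hD : wg = "D"
  · subst hD; rw [get_weekend_days_for_highlighting_inline]; simp only [if_neg h0]
    exact pvLoop_eq _ days []
  by_cases hE : wg = "E"
  · subst hE; rw [get_weekend_days_for_highlighting_inline]; simp only [if_neg h0]
    exact pvLoop_eq _ days []
  · have nA : ¬ ("A" = wg) := fun h => hA h.symm
    have nB : ¬ ("B" = wg) := fun h => hB h.symm
    have nC : ¬ ("C" = wg) := fun h => hC h.symm
    have nD : ¬ ("D" = wg) := fun h => hD h.symm
    have nE : ¬ ("E" = wg) := fun h => hE h.symm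
    have gA : pvGroupsA.get? wg = none := by
      simp [pvGroupsA, PySem.Dict.get?, nA, nB, nC, nD, nE]
    have gB : pvTokensB.get? wg = none := by
      simp [pvTokensB, PySem.Dict.get?, nA, nB, nC, nD, nE]
    rw [get_weekend_days_for_highlighting_inline, get_weekend_days_for_highlighting_inline_alt,
      if_neg h0, gA, gB]
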